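-- pv_equiv track=rewrite | github.com/swunoo/LearnPy | markovAnalysis.py | make_dict_dos
-- ===== SOURCE A (Python) =====
-- def make_dict_dos(file):
--     word_dict = dict()
--
--     for line in file:
--         line_list = line.strip().split(' ')
--
--         for i in range(0,len(line_list) - 2):
--             if((line_list[i], line_list[i+1]) in word_dict):
--                 if(line_list[i+2] in word_dict[(line_list[i], line_list[i+1])]):
--                     word_dict[(line_list[i], line_list[i+1])][line_list[i+2]] += 1
--                 else:
--                     word_dict[(line_list[i], line_list[i+1])][line_list[i+2]] = 1
--             else:
--                 word_dict[(line_list[i], line_list[i+1])] = {line_list[i+2] : 1}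
--
--     return word_dict
-- ===== SOURCE B (Python) =====
-- def make_dict_dos(file):
--     # Pass 1: one flat table keyed by the whole trigram.
--     flat = {}
--     for line in file:
--         ws = line.strip().split(' ')
--         for i in range(len(ws) - 2):
--             key = (ws[i], ws[i + 1], ws[i + 2])
--             flat[key] = flat.get(key, 0) + 1
--     # Pass 2: regroup the flat table into the nested dict-of-dicts.
--     word_dict = {}
--     for (w0, w1, w2), c in flat.items():
--         word_dict.setdefault((w0, w1), {})[w2] = c
--     return word_dict
-- ===== Notes on version B (the rewrite author's own statement) =====
-- stated objective: alternative
-- what changed: B counts into a single flat dict keyed by the whole trigram in one pass and then regroups that table into the nested dict-of-dicts in a second pass, instead of A's nested membership-test branching on a dict of dicts inside the scanning loop.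
import Mathlib
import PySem

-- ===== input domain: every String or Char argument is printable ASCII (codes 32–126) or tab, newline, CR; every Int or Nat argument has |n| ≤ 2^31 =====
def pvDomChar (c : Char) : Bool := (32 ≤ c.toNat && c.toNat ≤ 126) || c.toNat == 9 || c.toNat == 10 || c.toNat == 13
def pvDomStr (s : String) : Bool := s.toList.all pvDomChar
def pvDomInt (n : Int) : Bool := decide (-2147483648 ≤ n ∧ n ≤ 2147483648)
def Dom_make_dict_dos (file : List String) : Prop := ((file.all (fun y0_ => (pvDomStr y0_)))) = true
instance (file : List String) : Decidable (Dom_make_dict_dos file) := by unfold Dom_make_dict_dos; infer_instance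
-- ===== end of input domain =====

-- B replaces A's nested membership-branching dict-of-dicts update by a flat trigram
-- counter built in one pass plus a second regrouping pass (objective: alternative).

-- ===== PORT A =====
def make_dict_dos (file : List String) : List (String × String × List (String × Int)) :=
  (file.foldl (fun wd line =>
      let ll := (PySem.Chars.splitOn (PySem.Chars.strip line.toList) [' ']).map (fun w => String.ofList w)
      (PySem.List.pyRange 0 ((ll.length : Int) - 2) 1).foldl (fun wd i =>
        let w0 := PySem.List.pyGetD ll i ""
        let w1 := PySem.List.pyGetD ll (i + 1) ""
        let w2 := PySem.List.pyGetD ll (i + 2) ""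
        if wd.contains (w0, w1) then
          let inner := wd.getD (w0, w1) PySem.Dict.empty
          if inner.contains w2 then
            wd.insert (w0, w1) (inner.insert w2 (inner.getD w2 0 + 1))
          else
            wd.insert (w0, w1) (inner.insert w2 1)
        else
          wd.insert (w0, w1) (PySem.Dict.ofList [(w2, (1 : Int))])) wd)
    PySem.Dict.empty).items.map (fun p => (p.1.1, p.1.2, p.2.items))

-- ===== PORT B =====
def make_dict_dos_alt (file : List String) : List (String × String × List (String × Int)) :=
  let flat : PySem.Dict (String × String × String) Int :=
    file.foldl (fun fl line =>
      let ws := (PySem.Chars.splitOn (PySem.Chars.strip line.toList) [' ']).map (fun w => String.ofList w)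
      (PySem.List.pyRange 0 ((ws.length : Int) - 2) 1).foldl (fun fl i =>
        let key := (PySem.List.pyGetD ws i "", PySem.List.pyGetD ws (i + 1) "",
                    PySem.List.pyGetD ws (i + 2) "")
        fl.insert key (fl.getD key 0 + 1)) fl)
      PySem.Dict.empty
  (flat.items.foldl (fun wd p =>
      let wd1 := wd.setdefault (p.1.1, p.1.2.1) PySem.Dict.empty
      wd1.insert (p.1.1, p.1.2.1) ((wd1.getD (p.1.1, p.1.2.1) PySem.Dict.empty).insert p.1.2.2 p.2))
    PySem.Dict.empty).items.map (fun p => (p.1.1, p.1.2, p.2.items))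

-- ===== PRECONDITION & SPEC =====
def Spec_make_dict_dos (file : List String) (out : List (String × String × List (String × Int))) : Prop := out = make_dict_dos_alt file
instance (file : List String) (out : List (String × String × List (String × Int))) : Decidable (Spec_make_dict_dos file out) := by unfold Spec_make_dict_dos; infer_instance

-- ===== CLAIM (what is proved, stated in full; the proofs are below) =====
def Claim_equal_make_dict_dos : Prop := ∀ (file : List String), Dom_make_dict_dos file → Spec_make_dict_dos file (make_dict_dos file)

-- ===== LEMMAS AND PROOFS =====

-- the list of trigrams both programs scan, in scan order
def pvTriples (file : List String) : List (String × String × String) :=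
  file.flatMap (fun line =>
    let ll := (PySem.Chars.splitOn (PySem.Chars.strip line.toList) [' ']).map (fun w => String.ofList w)
    (PySem.List.pyRange 0 ((ll.length : Int) - 2) 1).map (fun i =>
      (PySem.List.pyGetD ll i "", PySem.List.pyGetD ll (i + 1) "", PySem.List.pyGetD ll (i + 2) "")))

-- A's update for one trigram, in canonical insert/getD form
def pvNStep (wd : PySem.Dict (String × String) (PySem.Dict String Int))
    (t : String × String × String) : PySem.Dict (String × String) (PySem.Dict String Int) :=
  let inner := wd.getD (t.1, t.2.1) PySem.Dict.empty
  wd.insert (t.1, t.2.1) (inner.insert t.2.2 (inner.getD t.2.2 0 + 1))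

-- B's regrouping step, in canonical insert/getD form
def pvRStep (wd : PySem.Dict (String × String) (PySem.Dict String Int))
    (p : (String × String × String) × Int) : PySem.Dict (String × String) (PySem.Dict String Int) :=
  wd.insert (p.1.1, p.1.2.1) ((wd.getD (p.1.1, p.1.2.1) PySem.Dict.empty).insert p.1.2.2 p.2)

theorem pvStepA_eq (wd : PySem.Dict (String × String) (PySem.Dict String Int)) (w0 w1 w2 : String) :
    (if wd.contains (w0, w1) then
       let inner := wd.getD (w0, w1) PySem.Dict.empty
       if inner.contains w2 then
         wd.insert (w0, w1) (inner.insert w2 (inner.getD w2 0 + 1))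
       else
         wd.insert (w0, w1) (inner.insert w2 1)
     else
       wd.insert (w0, w1) (PySem.Dict.ofList [(w2, (1 : Int))])) = pvNStep wd (w0, w1, w2) := by
  unfold pvNStep
  by_cases h : wd.contains (w0, w1)
  · simp only [h, if_true]
    by_cases h2 : (wd.getD (w0, w1) PySem.Dict.empty).contains w2
    · simp [h2]
    · simp only [Bool.not_eq_true] at h2
      rw [PySem.Dict.getD_of_not_contains _ _ h2]
      simp [h2]
  · simp only [Bool.not_eq_true] at h
    rw [PySem.Dict.getD_of_not_contains _ _ h]
    simp [h]
    rfl

theorem pvA_fold (file : List String) (init : PySem.Dict (String × String) (PySem.Dict String Int)) :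
    file.foldl (fun wd line =>
      let ll := (PySem.Chars.splitOn (PySem.Chars.strip line.toList) [' ']).map (fun w => String.ofList w)
      (PySem.List.pyRange 0 ((ll.length : Int) - 2) 1).foldl (fun wd i =>
        let w0 := PySem.List.pyGetD ll i ""
        let w1 := PySem.List.pyGetD ll (i + 1) ""
        let w2 := PySem.List.pyGetD ll (i + 2) ""
        if wd.contains (w0, w1) then
          let inner := wd.getD (w0, w1) PySem.Dict.empty
          if inner.contains w2 then
            wd.insert (w0, w1) (inner.insert w2 (inner.getD w2 0 + 1))
          else
            wd.insert (w0, w1) (inner.insert w2 1)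
        else
          wd.insert (w0, w1) (PySem.Dict.ofList [(w2, (1 : Int))])) wd) init
    = (pvTriples file).foldl pvNStep init := by
  unfold pvTriples
  rw [List.foldl_flatMap]
  apply PySem.List.foldl_congr_mem
  intro wd line _
  rw [List.foldl_map]
  apply PySem.List.foldl_congr_mem
  intro wd i _
  exact pvStepA_eq wd _ _ _

theorem pvA_eq_nested (file : List String) :
    make_dict_dos file =
      ((pvTriples file).foldl pvNStep PySem.Dict.empty).items.map (fun p => (p.1.1, p.1.2, p.2.items)) := by
  unfold make_dict_dos
  exact congrArg (fun d => d.items.map (fun p => (p.1.1, p.1.2, p.2.items))) (pvA_fold file PySem.Dict.empty)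

theorem pvStepB_eq (wd : PySem.Dict (String × String) (PySem.Dict String Int))
    (p : (String × String × String) × Int) :
    (let wd1 := wd.setdefault (p.1.1, p.1.2.1) PySem.Dict.empty
     wd1.insert (p.1.1, p.1.2.1) ((wd1.getD (p.1.1, p.1.2.1) PySem.Dict.empty).insert p.1.2.2 p.2))
    = pvRStep wd p := by
  unfold pvRStep
  by_cases h : wd.contains (p.1.1, p.1.2.1)
  · rw [PySem.Dict.setdefault_of_contains _ _ h]
  · simp only [Bool.not_eq_true] at h
    rw [PySem.Dict.setdefault_of_not_contains _ _ h]
    simp only []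
    rw [PySem.Dict.getD_insert_self, PySem.Dict.insert_insert_self,
        PySem.Dict.getD_of_not_contains _ _ h]

theorem pvB_flat (file : List String) :
    file.foldl (fun fl line =>
      let ws := (PySem.Chars.splitOn (PySem.Chars.strip line.toList) [' ']).map (fun w => String.ofList w)
      (PySem.List.pyRange 0 ((ws.length : Int) - 2) 1).foldl (fun fl i =>
        let key := (PySem.List.pyGetD ws i "", PySem.List.pyGetD ws (i + 1) "",
                    PySem.List.pyGetD ws (i + 2) "")
        fl.insert key (fl.getD key 0 + 1)) fl)
      PySem.Dict.empty
    = PySem.Dict.counter (pvTriples file) := by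
  rw [← PySem.Dict.foldl_insert_getD_add_one_eq_counter]
  unfold pvTriples
  rw [List.foldl_flatMap]
  apply PySem.List.foldl_congr_mem
  intro fl line _
  rw [List.foldl_map]

theorem pvB_eq_rg (file : List String) :
    make_dict_dos_alt file =
      ((PySem.Dict.counter (pvTriples file)).items.foldl pvRStep PySem.Dict.empty).items.map
        (fun p => (p.1.1, p.1.2, p.2.items)) := by
  unfold make_dict_dos_alt
  simp only []
  rw [pvB_flat]
  refine congrArg (fun d : PySem.Dict (String × String) (PySem.Dict String Int) =>
    d.items.map (fun p => (p.1.1, p.1.2, p.2.items))) ?_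
  apply PySem.List.foldl_congr_mem
  intro wd p _
  exact pvStepB_eq wd p

theorem pvInsert_comm_of_contains {κ ν : Type} [BEq κ] [LawfulBEq κ]
    (d : PySem.Dict κ ν) {a b : κ} (u v : ν) (hc : d.contains a = true) (hne : a ≠ b) :
    (d.insert a u).insert b v = (d.insert b v).insert a u := by
  have hba : (b == a) = false := by rw [beq_eq_false_iff_ne]; exact Ne.symm hne
  have hab : (a == b) = false := by rw [beq_eq_false_iff_ne]; exact hne
  apply PySem.Dict.ext
  by_cases hb : d.contains b
  · rw [PySem.Dict.items_insert_of_contains _ _ (by rw [PySem.Dict.contains_insert]; simp [hb]),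
        PySem.Dict.items_insert_of_contains _ _ hc,
        PySem.Dict.items_insert_of_contains _ _ (by rw [PySem.Dict.contains_insert]; simp [hc]),
        PySem.Dict.items_insert_of_contains _ _ hb]
    rw [List.map_map, List.map_map]
    apply List.map_congr_left
    intro p _
    simp only [Function.comp]
    by_cases h1 : p.1 == a
    · have hp : p.1 = a := eq_of_beq h1
      simp [hp, hab]
    · by_cases h2 : p.1 == b <;> simp [h1, h2, hba]
  · simp only [Bool.not_eq_true] at hb
    rw [PySem.Dict.items_insert_of_not_contains _ _ (by rw [PySem.Dict.contains_insert]; simp [hb, hba]),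
        PySem.Dict.items_insert_of_contains _ _ hc,
        PySem.Dict.items_insert_of_contains _ _ (by rw [PySem.Dict.contains_insert]; simp [hc]),
        PySem.Dict.items_insert_of_not_contains _ _ hb]
    rw [List.map_append]
    simp [hba]

-- a triple differs from t when its pair agrees with t's but its third does not
theorem pvThird_ne {p t : String × String × String}
    (hne : p ≠ t) (h0 : p.1 = t.1) (h1 : p.2.1 = t.2.1) : p.2.2 ≠ t.2.2 := by
  intro h2
  exact hne (Prod.ext h0 (Prod.ext h1 h2))

theorem pvI1 (l : List ((String × String × String) × Int)) (t : String × String × String)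
    (h : t ∉ l.map (·.1)) (d : PySem.Dict (String × String) (PySem.Dict String Int)) :
    ((l.foldl pvRStep d).getD (t.1, t.2.1) PySem.Dict.empty).contains t.2.2 =
      ((d.getD (t.1, t.2.1) PySem.Dict.empty)).contains t.2.2 := by
  induction l generalizing d with
  | nil => rfl
  | cons p l ih =>
    simp only [List.map_cons, List.mem_cons, not_or] at h
    obtain ⟨hpt, hrest⟩ := h
    rw [List.foldl_cons, ih (by simpa using hrest)]
    unfold pvRStep
    by_cases hK : (t.1, t.2.1) = ((p.1.1, p.1.2.1) : String × String)
    · have h0 : p.1.1 = t.1 := (Prod.mk.injEq _ _ _ _ ▸ hK).1.symm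
      have h1 : p.1.2.1 = t.2.1 := by
        have := (Prod.mk.injEq _ _ _ _ ▸ hK).2; exact this.symm
      have h2 : p.1.2.2 ≠ t.2.2 := pvThird_ne (fun e => hpt e.symm) h0 h1
      rw [hK, PySem.Dict.getD_insert_self, PySem.Dict.contains_insert]
      have : (t.2.2 == p.1.2.2) = false := by rw [beq_eq_false_iff_ne]; exact fun e => h2 e.symm
      rw [this]
      simp
    · rw [PySem.Dict.getD_insert_of_ne _ _ _ hK]

theorem pvStepComm (d : PySem.Dict (String × String) (PySem.Dict String Int))
    (t : String × String × String) (p : (String × String × String) × Int)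
    (hpt : p.1 ≠ t)
    (h1 : d.contains (t.1, t.2.1) = true)
    (h2 : (d.getD (t.1, t.2.1) PySem.Dict.empty).contains t.2.2 = true) :
    pvRStep (pvNStep d t) p = pvNStep (pvRStep d p) t := by
  unfold pvNStep pvRStep
  simp only []
  by_cases hK : ((p.1.1, p.1.2.1) : String × String) = (t.1, t.2.1)
  · have h0 : p.1.1 = t.1 := (Prod.mk.injEq _ _ _ _ ▸ hK).1
    have hsnd : p.1.2.1 = t.2.1 := (Prod.mk.injEq _ _ _ _ ▸ hK).2
    have hw : p.1.2.2 ≠ t.2.2 := pvThird_ne hpt h0 hsnd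
    rw [hK, PySem.Dict.getD_insert_self, PySem.Dict.insert_insert_self,
        PySem.Dict.getD_insert_self, PySem.Dict.insert_insert_self,
        PySem.Dict.getD_insert_of_ne _ _ _ (fun e => hw e.symm)]
    exact congrArg (d.insert (t.1, t.2.1))
      (pvInsert_comm_of_contains _ _ _ h2 (fun e => hw e.symm))
  · rw [PySem.Dict.getD_insert_of_ne _ _ _ hK,
        PySem.Dict.getD_insert_of_ne _ _ _ (fun e => hK e.symm)]
    exact pvInsert_comm_of_contains d _ _ h1 (fun e => hK e.symm)

theorem pvC (l : List ((String × String × String) × Int)) (t : String × String × String)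
    (h : t ∉ l.map (·.1)) (d : PySem.Dict (String × String) (PySem.Dict String Int))
    (h1 : d.contains (t.1, t.2.1) = true)
    (h2 : (d.getD (t.1, t.2.1) PySem.Dict.empty).contains t.2.2 = true) :
    l.foldl pvRStep (pvNStep d t) = pvNStep (l.foldl pvRStep d) t := by
  induction l generalizing d with
  | nil => rfl
  | cons p l ih =>
    simp only [List.map_cons, List.mem_cons, not_or] at h
    obtain ⟨hpt, hrest⟩ := h
    rw [List.foldl_cons, List.foldl_cons,
        pvStepComm d t p (fun e => hpt e.symm) h1 h2]
    apply ih (by simpa using hrest)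
    · unfold pvRStep
      rw [PySem.Dict.contains_insert]
      simp [h1]
    · unfold pvRStep
      by_cases hK : ((t.1, t.2.1) : String × String) = (p.1.1, p.1.2.1)
      · rw [hK, PySem.Dict.getD_insert_self, ← hK, PySem.Dict.contains_insert]
        simp [h2]
      · rw [PySem.Dict.getD_insert_of_ne _ _ _ hK]
        exact h2

theorem pvI2 (l : List ((String × String × String) × Int)) (t : String × String × String) (c : Int)
    (hnd : (l.map (·.1)).Nodup) (hmem : (t, c) ∈ l)
    (d : PySem.Dict (String × String) (PySem.Dict String Int)) :
    (l.map (fun p => if p.1 == t then (t, c + 1) else p)).foldl pvRStep d =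
      pvNStep (l.foldl pvRStep d) t := by
  induction l generalizing d with
  | nil => exact absurd hmem (List.not_mem_nil)
  | cons p l ih =>
    simp only [List.map_cons, List.nodup_cons] at hnd
    obtain ⟨hhead, hrest⟩ := hnd
    by_cases hpt : (p.1 == t)
    · have hp1 : p.1 = t := eq_of_beq hpt
      have htn : t ∉ l.map (·.1) := by rw [← hp1]; exact hhead
      have hpc : p = (t, c) := by
        rcases List.mem_cons.mp hmem with he | hm
        · exact he.symm
        · exact absurd (List.mem_map_of_mem (f := (·.1)) hm) htn
      subst hpc
      simp only [List.map_cons, hpt, if_true, List.foldl_cons]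
      have hmapid : l.map (fun p => if p.1 == t then (t, c + 1) else p) = l := by
        conv_rhs => rw [← List.map_id l]
        apply List.map_congr_left
        intro q hq
        have hqf : (q.1 == t) = false := by
          rw [beq_eq_false_iff_ne]
          intro e
          exact htn (e ▸ List.mem_map_of_mem (f := (·.1)) hq)
        simp [hqf]
      rw [hmapid]
      have hfix : pvRStep d (t, c + 1) = pvNStep (pvRStep d (t, c)) t := by
        unfold pvNStep pvRStep
        simp only []
        rw [PySem.Dict.getD_insert_self, PySem.Dict.getD_insert_self,
            PySem.Dict.insert_insert_self, PySem.Dict.insert_insert_self]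
      rw [hfix]
      apply pvC l t (by simpa [hp1] using hhead) (pvRStep d (t, c))
      · unfold pvRStep
        exact PySem.Dict.contains_insert_self _ _ _
      · unfold pvRStep
        rw [PySem.Dict.getD_insert_self]
        exact PySem.Dict.contains_insert_self _ _ _
    · have hupd : (if p.1 == t then (t, c + 1) else p) = p := by simp [hpt]
      have hm : (t, c) ∈ l := by
        rcases List.mem_cons.mp hmem with he | hm
        · exact absurd (by rw [← he]; simp : (p.1 == t) = true) (by simpa using hpt)
        · exact hm
      simp only [List.map_cons, hupd, List.foldl_cons]
      exact ih hrest hm (pvRStep d p)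

theorem pvKey (f : PySem.Dict (String × String × String) Int) (hnd : f.keys.Nodup)
    (t : String × String × String) :
    (f.insert t (f.getD t 0 + 1)).items.foldl pvRStep PySem.Dict.empty =
      pvNStep (f.items.foldl pvRStep PySem.Dict.empty) t := by
  by_cases h : f.contains t
  · rw [PySem.Dict.items_insert_of_contains _ _ h]
    have hsome : f.get? t = some (f.getD t 0) := by
      have hi := PySem.Dict.contains_eq_isSome_get? f t
      rw [h] at hi
      obtain ⟨v, hv⟩ := Option.isSome_iff_exists.mp hi.symm
      rw [hv, PySem.Dict.getD_eq_get?_getD, hv]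
      rfl
    have hmem : (t, f.getD t 0) ∈ f.items := PySem.Dict.mem_items_of_get?_eq_some _ hsome
    exact pvI2 f.items t (f.getD t 0) (by simpa [PySem.Dict.keys] using hnd) hmem PySem.Dict.empty
  · simp only [Bool.not_eq_true] at h
    rw [PySem.Dict.items_insert_of_not_contains _ _ h, List.foldl_append]
    have hni : t ∉ f.items.map (·.1) := by
      intro hm
      have hc : f.contains t = true := (PySem.Dict.contains_iff_mem_keys f t).mpr hm
      rw [h] at hc
      exact Bool.false_ne_true hc
    have hcw := pvI1 f.items t hni PySem.Dict.empty
    have hg0 : ((f.items.foldl pvRStep PySem.Dict.empty).getD (t.1, t.2.1) PySem.Dict.empty).getD t.2.2 0 = 0 := by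
      apply PySem.Dict.getD_of_not_contains
      rw [hcw]
      rfl
    rw [PySem.Dict.getD_of_not_contains _ _ h, List.foldl_cons, List.foldl_nil]
    revert hg0
    generalize f.items.foldl pvRStep PySem.Dict.empty = G
    intro hg0
    show pvRStep G (t, 0 + 1) = pvNStep G t
    unfold pvNStep pvRStep
    simp only []
    rw [hg0]

theorem pvMain (ts : List (String × String × String)) :
    (PySem.Dict.counter ts).items.foldl pvRStep PySem.Dict.empty = ts.foldl pvNStep PySem.Dict.empty := by
  induction ts using List.reverseRecOn with
  | nil => rfl
  | append_singleton ts t ih =>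
    rw [PySem.Dict.counter_append_singleton, List.foldl_append, List.foldl_cons, List.foldl_nil]
    have hmod : (PySem.Dict.counter ts).modify t 0 (· + 1)
        = (PySem.Dict.counter ts).insert t ((PySem.Dict.counter ts).getD t 0 + 1) := rfl
    rw [hmod, pvKey _ (PySem.Dict.nodup_keys_counter ts) t, ih]

-- ===== VERDICT (by name: the statement is the Claim_ definition above) =====
theorem make_dict_dos_spec : Claim_equal_make_dict_dos := by
  intro file _
  unfold Spec_make_dict_dos
  rw [pvA_eq_nested, pvB_eq_rg, pvMain]
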